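-- pv_equiv track=rewrite | github.com/markdefaoite/workbook | Multiway Merge Algorithm.py | oneStepKWayMerge
-- ===== SOURCE A (Python) =====
-- def twoWayMerge(lst1, lst2):
--     # Implement the two way merge algorithm on
--     #          two ascending order sorted lists
--     # return a fresh ascending order sorted list that
--     #          merges lst1 and lst2
--     # your code here
--     n1 = len(lst1)
--     n2 = len(lst2)
--     if n1 == 0: # lst1 is empty
--         return list(lst2)
--     elif n2 == 0:
--         return list(lst1)
--     else:
--         output_lst = [] # This is the list we will return
--         i1 = 0
--         i2 = 0
--         while (i1 < n1 or i2 < n2):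
--             if i1 < n1 and i2 < n2: # We are processing both lists
--                 if (lst1[i1] <= lst2[i2]): # lst[i1] is the smaller elt
--                     output_lst.append(lst1[i1]) # append to end of output list
--                     i1 = i1 + 1 # advance index i1
--                 else:
--                     output_lst.append(lst2[i2]) # append to end of output list
--                     i2 = i2 + 1 # advance index i2
--             elif i1 < n1: # We have run past the end of lst2
--                 output_lst.append(lst1[i1]) # append lst1 to end of output list
--                 i1 = i1 + 1
--             else:  # We have run past the end of lst1
--                 output_lst.append(lst2[i2]) # append lst2 to end of output list
--                 i2 = i2 + 1
--         return output_lst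
--
-- def oneStepKWayMerge(list_of_lists):
--     if (len(list_of_lists) <= 1):
--         return list_of_lists
--     ret_list_of_lists = []
--     k = len(list_of_lists)
--     for i in range(0, k, 2):
--         if (i < k - 1):
--             ret_list_of_lists.append(twoWayMerge(list_of_lists[i], list_of_lists[i + 1]))
--         else:
--             ret_list_of_lists.append(list_of_lists[k - 1])
--     return ret_list_of_lists
-- ===== SOURCE B (Python) =====
-- def merge2(a, b):
--     # consume reversed working copies with pop(); build result front-to-back
--     ra, rb = a[::-1], b[::-1]
--     out = []
--     while ra and rb:
--         if ra[-1] <= rb[-1]: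
--             out.append(ra.pop())
--         else:
--             out.append(rb.pop())
--     out.extend(reversed(ra))
--     out.extend(reversed(rb))
--     return out
--
-- def oneStepKWayMerge(list_of_lists):
--     if len(list_of_lists) <= 1:
--         return list_of_lists
--     it = iter(list_of_lists)
--     out = [merge2(a, b) for a, b in zip(it, it)]
--     if len(list_of_lists) % 2:
--         out.append(list_of_lists[-1])
--     return out
-- ===== Notes on version B (the rewrite author's own statement) =====
-- stated objective: idiomatic
-- what changed: The index-driven two-pointer merge loop is replaced by a merge that destructively consumes reversed working copies with pop() and extends with the leftovers, and the outer range(0,k,2) index loop with an in-loop parity branch is replaced by pairing the list with zip(it,it) plus a single trailing-odd append.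
import Mathlib
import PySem

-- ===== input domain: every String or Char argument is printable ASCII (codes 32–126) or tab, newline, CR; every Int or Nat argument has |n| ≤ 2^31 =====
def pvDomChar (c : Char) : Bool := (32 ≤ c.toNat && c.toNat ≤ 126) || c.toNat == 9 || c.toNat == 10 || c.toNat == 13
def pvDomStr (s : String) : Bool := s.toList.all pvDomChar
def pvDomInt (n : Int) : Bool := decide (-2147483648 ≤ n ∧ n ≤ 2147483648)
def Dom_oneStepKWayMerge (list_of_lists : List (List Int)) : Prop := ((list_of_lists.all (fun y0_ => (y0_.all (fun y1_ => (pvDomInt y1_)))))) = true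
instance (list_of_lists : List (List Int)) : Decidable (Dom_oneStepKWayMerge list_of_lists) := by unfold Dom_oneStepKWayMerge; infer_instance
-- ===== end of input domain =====

-- B replaces A's index-based two-pointer merge and range(0,k,2) loop by a pop()-driven
-- merge of reversed copies and zip-pairing; equal return values on every input (proved below).

-- ===== PORT A =====
-- the while-loop of twoWayMerge: state = indices i1 i2 and the output list;
-- the fuel argument only bounds the iteration count (one index advances per step)
def twoLoop (fuel : Nat) (l1 l2 : List Int) (i1 i2 : Nat) (out : List Int) : List Int :=
  match fuel with
  | 0 => out
  | fuel + 1 =>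
  if i1 < l1.length ∨ i2 < l2.length then
    if i1 < l1.length ∧ i2 < l2.length then
      if l1.getD i1 0 ≤ l2.getD i2 0 then
        twoLoop fuel l1 l2 (i1+1) i2 (out ++ [l1.getD i1 0])
      else
        twoLoop fuel l1 l2 i1 (i2+1) (out ++ [l2.getD i2 0])
    else if i1 < l1.length then
      twoLoop fuel l1 l2 (i1+1) i2 (out ++ [l1.getD i1 0])
    else
      twoLoop fuel l1 l2 i1 (i2+1) (out ++ [l2.getD i2 0])
  else out

def twoWayMerge (lst1 lst2 : List Int) : List Int :=
  if lst1.length = 0 then lst2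
  else if lst2.length = 0 then lst1
  else twoLoop (lst1.length + lst2.length) lst1 lst2 0 0 []

def oneStepKWayMerge (list_of_lists : List (List Int)) : List (List Int) :=
  if list_of_lists.length ≤ 1 then list_of_lists
  else
    let k : Int := list_of_lists.length
    (PySem.List.pyRange 0 k 2).foldl
      (fun acc i =>
        if i < k - 1 then
          acc ++ [twoWayMerge (PySem.List.pyGetD list_of_lists i [])
                              (PySem.List.pyGetD list_of_lists (i+1) [])]
        else
          acc ++ [PySem.List.pyGetD list_of_lists (k-1) []]) []

-- ===== PORT B =====
-- the while-loop of merge2: ra, rb are the reversed working copies; pop() = dropLast,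
-- ra[-1] = pyGetD ra (-1); the fuel argument only bounds the iteration count (one pop per step)
def popLoop (fuel : Nat) (ra rb out : List Int) : List Int :=
  match fuel with
  | 0 => (out ++ ra.reverse) ++ rb.reverse
  | fuel + 1 =>
    if ra ≠ [] ∧ rb ≠ [] then
      if PySem.List.pyGetD ra (-1) 0 ≤ PySem.List.pyGetD rb (-1) 0 then
        popLoop fuel ra.dropLast rb (out ++ [PySem.List.pyGetD ra (-1) 0])
      else
        popLoop fuel ra rb.dropLast (out ++ [PySem.List.pyGetD rb (-1) 0])
    else (out ++ ra.reverse) ++ rb.reverse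

def merge2 (a b : List Int) : List Int :=
  popLoop (a.length + b.length) a.reverse b.reverse []

-- zip(it, it) pairs consecutive elements; ported as recursion over adjacent pairs
def zipPairs (l : List (List Int)) : List (List Int) :=
  match l with
  | [] => []
  | [_] => []      -- zip(it, it) drops an unpaired trailing element
  | a :: b :: rest => merge2 a b :: zipPairs rest

def oneStepKWayMerge_alt (list_of_lists : List (List Int)) : List (List Int) :=
  if list_of_lists.length ≤ 1 then list_of_lists
  else
    let out := zipPairs list_of_lists
    if (list_of_lists.length : Int) % 2 = 1 then
      out ++ [PySem.List.pyGetD list_of_lists (-1) []]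
    else out

-- ===== PRECONDITION & SPEC =====
def Spec_oneStepKWayMerge (list_of_lists : List (List Int)) (out : List (List Int)) : Prop := out = oneStepKWayMerge_alt list_of_lists
instance (list_of_lists : List (List Int)) (out : List (List Int)) : Decidable (Spec_oneStepKWayMerge list_of_lists out) := by unfold Spec_oneStepKWayMerge; infer_instance

-- ===== CLAIM (what is proved, stated in full; the proofs are below) =====
def Claim_equal_oneStepKWayMerge : Prop := ∀ (list_of_lists : List (List Int)), Dom_oneStepKWayMerge list_of_lists → Spec_oneStepKWayMerge list_of_lists (oneStepKWayMerge list_of_lists)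

-- ===== LEMMAS AND PROOFS =====

-- reference merge, used as the common characterisation of both merges
def mergeRec : List Int → List Int → List Int
  | [], b => b
  | a, [] => a
  | x :: xs, y :: ys =>
    if x ≤ y then x :: mergeRec xs (y :: ys) else y :: mergeRec (x :: xs) ys
termination_by a b => a.length + b.length

-- reference one round: merge adjacent pairs, keep a trailing odd element
def chunk : List (List Int) → List (List Int)
  | [] => []
  | [a] => [a]
  | a :: b :: rest => mergeRec a b :: chunk rest

lemma pyGetD_cons_succ {α : Type} (x : α) (xs : List α) (i : Int) (d : α) (h : 0 ≤ i) :
    PySem.List.pyGetD (x :: xs) (i + 1) d = PySem.List.pyGetD xs i d := by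
  rw [PySem.List.pyGetD_of_nonneg _ _ (by omega), PySem.List.pyGetD_of_nonneg _ _ h,
    show (i + 1).toNat = i.toNat + 1 by omega]
  rfl

lemma pyGetD_cons2 {α : Type} (x y : α) (xs : List α) (i : Int) (d : α) (h : 0 ≤ i) :
    PySem.List.pyGetD (x :: y :: xs) (i + 2) d = PySem.List.pyGetD xs i d := by
  rw [show i + 2 = (i + 1) + 1 by ring, pyGetD_cons_succ x _ (i+1) d (by omega),
    pyGetD_cons_succ y xs i d h]

lemma twoLoop_eq (n : Nat) (l1 l2 : List Int) (i1 i2 : Nat) (out : List Int)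
    (hn : (l1.length - i1) + (l2.length - i2) ≤ n) :
    twoLoop n l1 l2 i1 i2 out = out ++ mergeRec (l1.drop i1) (l2.drop i2) := by
  match n with
  | 0 =>
    rw [twoLoop,
      show l1.drop i1 = [] from List.drop_eq_nil_of_le (by omega),
      show l2.drop i2 = [] from List.drop_eq_nil_of_le (by omega)]
    simp [mergeRec]
  | n + 1 =>
  rw [twoLoop]
  by_cases h : i1 < l1.length ∨ i2 < l2.length
  · simp only [if_pos h]
    by_cases hb : i1 < l1.length ∧ i2 < l2.length
    · simp only [if_pos hb]
      obtain ⟨h1, h2⟩ := hb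
      rw [List.drop_eq_getElem_cons h1, List.drop_eq_getElem_cons h2,
        show l1.getD i1 0 = l1[i1] from List.getD_eq_getElem l1 0 h1,
        show l2.getD i2 0 = l2[i2] from List.getD_eq_getElem l2 0 h2]
      by_cases hc : l1[i1] ≤ l2[i2]
      · rw [if_pos hc, twoLoop_eq n l1 l2 (i1+1) i2 _ (by omega), mergeRec, if_pos hc,
          ← List.drop_eq_getElem_cons h2]
        simp
      · rw [if_neg hc, twoLoop_eq n l1 l2 i1 (i2+1) _ (by omega), mergeRec, if_neg hc,
          ← List.drop_eq_getElem_cons h1]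
        simp
    · simp only [if_neg hb]
      by_cases h1 : i1 < l1.length
      · have h2 : ¬ i2 < l2.length := fun h2 => hb ⟨h1, h2⟩
        rw [if_pos h1, twoLoop_eq n l1 l2 (i1+1) i2 _ (by omega),
          show l2.drop i2 = [] from List.drop_eq_nil_of_le (by omega),
          List.drop_eq_getElem_cons h1,
          show l1.getD i1 0 = l1[i1] from List.getD_eq_getElem l1 0 h1]
        rcases hd : l1.drop (i1+1) with _ | ⟨z, zs⟩ <;> simp [mergeRec]
      · have h2 : i2 < l2.length := by omega
        rw [if_neg h1, twoLoop_eq n l1 l2 i1 (i2+1) _ (by omega),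
          show l1.drop i1 = [] from List.drop_eq_nil_of_le (by omega),
          List.drop_eq_getElem_cons h2,
          show l2.getD i2 0 = l2[i2] from List.getD_eq_getElem l2 0 h2]
        simp [mergeRec]
  · simp only [if_neg h]
    rw [show l1.drop i1 = [] from List.drop_eq_nil_of_le (by omega),
      show l2.drop i2 = [] from List.drop_eq_nil_of_le (by omega)]
    simp [mergeRec]

lemma twoWayMerge_eq_mergeRec (a b : List Int) : twoWayMerge a b = mergeRec a b := by
  rcases a with _ | ⟨x, xs⟩
  · simp [twoWayMerge, mergeRec]
  · rcases b with _ | ⟨y, ys⟩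
    · simp [twoWayMerge, mergeRec]
    · rw [twoWayMerge, if_neg (by simp), if_neg (by simp),
        twoLoop_eq _ _ _ 0 0 [] (by omega)]
      simp

lemma popLoop_eq (n : Nat) (a b out : List Int) (hn : a.length + b.length ≤ n) :
    popLoop n a.reverse b.reverse out = out ++ mergeRec a b := by
  match n with
  | 0 =>
    have ha : a = [] := by
      have := List.length_eq_zero_iff.1 (by omega : a.length = 0)
      exact this
    have hb : b = [] := List.length_eq_zero_iff.1 (by omega : b.length = 0)
    subst ha; subst hb
    rw [popLoop]
    simp [mergeRec]
  | n + 1 =>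
    rcases a with _ | ⟨x, xs⟩
    · rw [popLoop]
      simp [mergeRec]
    · rcases b with _ | ⟨y, ys⟩
      · rw [popLoop]
        simp [mergeRec]
      · rw [popLoop]
        have hra : (x :: xs).reverse = xs.reverse ++ [x] := by simp
        have hrb : (y :: ys).reverse = ys.reverse ++ [y] := by simp
        rw [hra, hrb, if_pos (And.intro (by simp) (by simp)),
          PySem.List.pyGetD_neg_one_append_singleton,
          PySem.List.pyGetD_neg_one_append_singleton]
        by_cases hc : x ≤ y
        · rw [if_pos hc, List.dropLast_concat, ← hrb,
            popLoop_eq n xs (y :: ys) _ (by simp at hn ⊢; omega),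
            mergeRec, if_pos hc]
          simp
        · rw [if_neg hc, List.dropLast_concat, ← hra,
            popLoop_eq n (x :: xs) ys _ (by simp at hn ⊢; omega),
            mergeRec, if_neg hc]
          simp

lemma merge2_eq_mergeRec (a b : List Int) : merge2 a b = mergeRec a b := by
  simpa [merge2] using popLoop_eq (a.length + b.length) a b [] le_rfl

-- pull the per-iteration append out of A's foldl
lemma foldl_ifappend (l : List Int) (p : Int → Prop) [DecidablePred p]
    (u v : Int → List (List Int)) (acc : List (List Int)) :
    l.foldl (fun acc i => if p i then acc ++ u i else acc ++ v i) acc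
      = acc ++ l.flatMap (fun i => if p i then u i else v i) := by
  induction l generalizing acc with
  | nil => simp
  | cons z zs ih => by_cases hz : p z <;> simp [ih, hz]

-- one step of range(0, k, 2)
lemma pyRange_two_cons (k : Int) (h : 0 < k) :
    PySem.List.pyRange 0 k 2 = 0 :: (PySem.List.pyRange 0 (k-2) 2).map (· + 2) := by
  rw [PySem.List.pyRange_of_pos _ _ (by norm_num), PySem.List.pyRange_of_pos _ _ (by norm_num),
    if_pos h]
  have hcnt : ((k - 0 + 2 - 1)/2).toNat
      = (if (0:Int) < k - 2 then ((k - 2 - 0 + 2 - 1)/2).toNat else 0) + 1 := by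
    by_cases h2 : (0:Int) < k - 2
    · rw [if_pos h2]; omega
    · rw [if_neg h2]
      have hk1 : k = 1 ∨ k = 2 := by omega
      rcases hk1 with rfl | rfl <;> decide
  rw [hcnt, List.range_succ_eq_map, List.map_cons, List.map_map, List.map_map]
  refine congrArg₂ _ (by norm_num) (List.map_congr_left fun a _ => ?_)
  simp [Function.comp]
  ring

-- A's mapped loop body over range(0, k, 2) produces exactly chunk
lemma map_pyRange_eq_chunk (L : List (List Int)) :
    ((PySem.List.pyRange 0 (L.length : Int) 2).map
      (fun i =>
        if i < (L.length : Int) - 1 then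
          mergeRec (PySem.List.pyGetD L i []) (PySem.List.pyGetD L (i+1) [])
        else PySem.List.pyGetD L ((L.length : Int) - 1) [])) = chunk L := by
  match L with
  | [] =>
    rw [chunk]
    rw [show PySem.List.pyRange 0 (([] : List (List Int)).length : Int) 2 = [] by decide]
    rfl
  | [x] =>
    rw [chunk]
    rw [show PySem.List.pyRange 0 (([x] : List (List Int)).length : Int) 2 = [0] by
      rw [show (([x] : List (List Int)).length : Int) = 1 by simp]
      decide]
    rw [List.map_singleton, if_neg (by simp), show ((([x] : List (List Int)).length : Int) - 1) = 0 by simp,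
      PySem.List.pyGetD_zero_cons]
  | x :: y :: rest =>
    have ih := map_pyRange_eq_chunk rest
    have hn : (0:Int) ≤ (rest.length : Int) := Int.natCast_nonneg _
    have hk : (((x :: y :: rest) : List (List Int)).length : Int) = (rest.length : Int) + 2 := by
      simp; ring
    rw [chunk, hk, pyRange_two_cons _ (by omega), List.map_cons, List.map_map,
      show (rest.length : Int) + 2 - 2 = (rest.length : Int) by ring, List.cons_eq_cons]
    refine ⟨?_, ?_⟩
    · rw [if_pos (by omega), PySem.List.pyGetD_zero_cons,
        show (0:Int) + 1 = 0 + 1 by rfl,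
        pyGetD_cons_succ x (y :: rest) 0 [] (by omega), PySem.List.pyGetD_zero_cons]
    · rw [← ih]
      refine List.map_congr_left fun i hi => ?_
      obtain ⟨h0, hlt, -⟩ := (PySem.List.mem_pyRange_iff_of_pos (by norm_num : (0:Int) < 2) i).1 hi
      simp only [Function.comp_apply]
      by_cases hcond : i < (rest.length : Int) - 1
      · rw [if_pos (by omega), if_pos hcond, pyGetD_cons2 x y rest i [] h0,
          show i + 2 + 1 = (i + 1) + 2 by ring, pyGetD_cons2 x y rest (i+1) [] (by omega)]
      · rw [if_neg (by omega), if_neg hcond,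
          show (rest.length : Int) + 2 - 1 = ((rest.length : Int) - 1) + 2 by ring,
          pyGetD_cons2 x y rest _ [] (by omega)]
termination_by L.length

lemma A_eq_chunk (L : List (List Int)) : oneStepKWayMerge L = chunk L := by
  rw [oneStepKWayMerge]
  by_cases h : L.length ≤ 1
  · rw [if_pos h]
    interval_cases hL : L.length
    · rw [List.length_eq_zero_iff.1 hL, chunk]
    · obtain ⟨x, hx⟩ := List.length_eq_one_iff.1 hL
      rw [hx, chunk]
  · rw [if_neg h]
    dsimp only
    rw [foldl_ifappend _ _
      (fun i => [twoWayMerge (PySem.List.pyGetD L i []) (PySem.List.pyGetD L (i+1) [])])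
      (fun _ => [PySem.List.pyGetD L ((L.length : Int)-1) []]) [],
      List.nil_append]
    have hflat : ∀ (l : List Int) (f : Int → List Int),
        l.flatMap (fun i => [f i]) = l.map f := by
      intro l f
      induction l with
      | nil => rfl
      | cons z zs ih => simp [ih]
    rw [show (fun i => if i < (L.length : Int) - 1 then
          [twoWayMerge (PySem.List.pyGetD L i []) (PySem.List.pyGetD L (i+1) [])]
        else [PySem.List.pyGetD L ((L.length : Int)-1) []])
      = (fun i => [if i < (L.length : Int) - 1 then
          twoWayMerge (PySem.List.pyGetD L i []) (PySem.List.pyGetD L (i+1) [])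
        else PySem.List.pyGetD L ((L.length : Int)-1) []]) from
      funext (fun i => by split_ifs <;> rfl)]
    rw [hflat _ (fun i => if i < (L.length : Int) - 1 then
          twoWayMerge (PySem.List.pyGetD L i []) (PySem.List.pyGetD L (i+1) [])
        else PySem.List.pyGetD L ((L.length : Int)-1) [])]
    rw [show (fun i => if i < (L.length : Int) - 1 then
          twoWayMerge (PySem.List.pyGetD L i []) (PySem.List.pyGetD L (i+1) [])
        else PySem.List.pyGetD L ((L.length : Int)-1) [])
      = (fun i => if i < (L.length : Int) - 1 then
          mergeRec (PySem.List.pyGetD L i []) (PySem.List.pyGetD L (i+1) [])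
        else PySem.List.pyGetD L ((L.length : Int)-1) []) from
      funext (fun i => by rw [twoWayMerge_eq_mergeRec])]
    exact map_pyRange_eq_chunk L

lemma zipPairs_odd_eq_chunk (L : List (List Int)) :
    (zipPairs L ++ if (L.length : Int) % 2 = 1 then [PySem.List.pyGetD L (-1) []] else [])
      = chunk L := by
  match L with
  | [] => rw [zipPairs, chunk]; simp
  | [x] =>
    rw [zipPairs, chunk, if_pos (by simp), PySem.List.pyGetD_neg_one [x] [] (by simp)]
    simp
  | x :: y :: rest =>
    have ih := zipPairs_odd_eq_chunk rest
    rw [zipPairs, chunk, merge2_eq_mergeRec, List.cons_append, List.cons_eq_cons]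
    refine ⟨rfl, ?_⟩
    rw [← ih]
    have hpar : (((x :: y :: rest : List (List Int)).length : Int) % 2 = 1)
        ↔ ((rest.length : Int) % 2 = 1) := by simp; omega
    by_cases hp : (rest.length : Int) % 2 = 1
    · rw [if_pos (hpar.2 hp), if_pos hp]
      have hne : rest ≠ [] := by
        intro hnil
        rw [hnil] at hp
        simp at hp
      rw [PySem.List.pyGetD_neg_one _ _ (by simp), PySem.List.pyGetD_neg_one rest [] hne]
      congr 1
      simp [List.getLast_cons, hne]
    · rw [if_neg (fun hh => hp (hpar.1 hh)), if_neg hp]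
termination_by L.length

lemma B_eq_chunk (L : List (List Int)) : oneStepKWayMerge_alt L = chunk L := by
  rw [oneStepKWayMerge_alt]
  by_cases h : L.length ≤ 1
  · rw [if_pos h]
    interval_cases hL : L.length
    · rw [List.length_eq_zero_iff.1 hL, chunk]
    · obtain ⟨x, hx⟩ := List.length_eq_one_iff.1 hL
      rw [hx, chunk]
  · rw [if_neg h]
    dsimp only
    rw [← zipPairs_odd_eq_chunk L]
    by_cases hp : ((L.length : Int) % 2 = 1) <;> simp [hp]

-- ===== VERDICT (by name: the statement is the Claim_ definition above) =====
theorem oneStepKWayMerge_spec : Claim_equal_oneStepKWayMerge := by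
  intro L _
  unfold Spec_oneStepKWayMerge
  rw [A_eq_chunk, B_eq_chunk]
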